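-- pv_equiv track=rewrite | github.com/opensourcex123/LeetCode | demo44 黑白方格画.py | paintingPlan
-- ===== SOURCE A (Python) =====
-- def paintingPlan(n, k):
--     if k in (0,n*n):
--         return 1
--     def combination(n,a):   #计算组合数
--         res=1
--         for i in range(n,n-a,-1):   #还是左闭右开区间
--             res*=i
--         for j in range(1,a+1):
--             res//=j
--         return res
--     count=0
--     for i in range(0,n):
--         for j in range(0,n):
--             if n*(i+j)-(i*j)==k:
--                 count=count+combination(n,i)*combination(n,j)   #选择行列乘起来一共多少种方法
--     return count
-- ===== SOURCE B (Python) =====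
-- def paintingPlan(n, k):
--     # Same result as A, but for each row count i the unique matching column
--     # count j is solved directly from n*i + (n-i)*j == k instead of scanning all j.
--     if k in (0, n*n):
--         return 1
--     def combination(n, a):   # same helper as A
--         res = 1
--         for i in range(n, n-a, -1):
--             res *= i
--         for j in range(1, a+1):
--             res //= j
--         return res
--     count = 0
--     for i in range(0, n):
--         q, r = divmod(k - n*i, n - i)
--         if r == 0 and 0 <= q < n:
--             count += combination(n, i) * combination(n, q)
--     return count
-- ===== Notes on version B (the rewrite author's own statement) =====
-- stated objective: faster
-- what changed: The inner loop over all column counts j is removed: for each row count i, the unique j with n*(i+j)-i*j==k is obtained by one divmod (j=(k-n*i)/(n-i)) and checked to be an integer in range, turning the O(n^2) pair scan into an O(n) scan.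
import Mathlib
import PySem

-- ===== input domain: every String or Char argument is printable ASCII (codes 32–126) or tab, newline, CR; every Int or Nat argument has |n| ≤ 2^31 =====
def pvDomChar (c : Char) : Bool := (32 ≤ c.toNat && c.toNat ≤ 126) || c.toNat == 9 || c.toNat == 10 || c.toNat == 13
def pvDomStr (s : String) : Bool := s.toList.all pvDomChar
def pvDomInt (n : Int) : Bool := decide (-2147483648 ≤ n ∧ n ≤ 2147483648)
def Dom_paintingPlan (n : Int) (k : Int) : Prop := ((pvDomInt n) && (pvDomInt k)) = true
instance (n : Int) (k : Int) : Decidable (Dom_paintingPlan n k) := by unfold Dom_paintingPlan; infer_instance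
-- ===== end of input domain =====

-- B removes A's inner scan over j: for each i the unique j with n*(i+j)-i*j = k is solved by one divmod (asymptotically faster).


-- the nested helper 'combination' is textually identical in A and in B (Source B); ported once, used by both ports
def pvCombination (n : Int) (a : Int) : Int :=
  let res := (PySem.List.pyRange n (n - a) (-1)).foldl (fun r i => r * i) 1
  (PySem.List.pyRange 1 (a + 1) 1).foldl (fun r j => PySem.Int.floordiv r j) res

-- ===== PORT A =====
def paintingPlan (n : Int) (k : Int) : Int :=
  if k = 0 ∨ k = n * n then 1
  else
    (PySem.List.pyRange 0 n 1).foldl (fun count i =>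
      (PySem.List.pyRange 0 n 1).foldl (fun count j =>
        if n * (i + j) - i * j = k then count + pvCombination n i * pvCombination n j
        else count) count) 0

-- ===== PORT B =====
def paintingPlan_alt (n : Int) (k : Int) : Int :=
  if k = 0 ∨ k = n * n then 1
  else
    (PySem.List.pyRange 0 n 1).foldl (fun count i =>
      let q := PySem.Int.floordiv (k - n * i) (n - i)
      let r := PySem.Int.mod (k - n * i) (n - i)
      if r = 0 ∧ 0 ≤ q ∧ q < n then count + pvCombination n i * pvCombination n q
      else count) 0

-- ===== PRECONDITION & SPEC =====
def Spec_paintingPlan (n : Int) (k : Int) (out : Int) : Prop := out = paintingPlan_alt n k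
instance (n : Int) (k : Int) (out : Int) : Decidable (Spec_paintingPlan n k out) := by unfold Spec_paintingPlan; infer_instance

-- ===== CLAIM (what is proved, stated in full; the proofs are below) =====
def Claim_equal_paintingPlan : Prop := ∀ (n : Int) (k : Int), Dom_paintingPlan n k → Spec_paintingPlan n k (paintingPlan n k)

-- ===== LEMMAS AND PROOFS =====

-- summing 'f j if j = q else 0' over a duplicate-free list picks out at most the one term at q
lemma pv_sum_map_ite_eq (l : List Int) (hl : l.Nodup) (q : Int) (f : Int → Int) :
    (l.map (fun j => if j = q then f j else 0)).sum = if q ∈ l then f q else 0 := by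
  induction l with
  | nil => simp
  | cons a l ih =>
    obtain ⟨ha, hl'⟩ := List.nodup_cons.mp hl
    by_cases h : a = q
    · subst h
      have : (l.map (fun j => if j = a then f j else 0)).sum = 0 := by
        rw [ih hl']
        simp [ha]
      simp [this]
    · simp [h, ih hl', Ne.symm h]

-- for 0 ≤ i < n, A's inner scan over j equals B's direct divmod step
lemma pv_inner_eq (n k i c : Int) (_h0 : 0 ≤ i) (h1 : i < n) :
    (PySem.List.pyRange 0 n 1).foldl (fun count j =>
        if n * (i + j) - i * j = k then count + pvCombination n i * pvCombination n j
        else count) c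
    = (let q := PySem.Int.floordiv (k - n * i) (n - i)
       let r := PySem.Int.mod (k - n * i) (n - i)
       if r = 0 ∧ 0 ≤ q ∧ q < n then c + pvCombination n i * pvCombination n q
       else c) := by
  set q := PySem.Int.floordiv (k - n * i) (n - i) with hq
  set r := PySem.Int.mod (k - n * i) (n - i) with hr
  have hd : (0:Int) < n - i := by omega
  have hdm : q * (n - i) + r = k - n * i := PySem.Int.floordiv_mul_add_mod _ _
  -- the inner test is equivalent to (r = 0 ∧ j = q)
  have hiff : ∀ j : Int, (n * (i + j) - i * j = k) ↔ (r = 0 ∧ j = q) := by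
    intro j
    constructor
    · intro h
      have hlin : (n - i) * j = k - n * i := by linear_combination h
      have hdvd : (n - i) ∣ (k - n * i) := ⟨j, hlin.symm⟩
      have hr0 : r = 0 := by
        rw [hr]; exact (PySem.Int.mod_eq_zero_iff_dvd _ _).mpr hdvd
      refine ⟨hr0, ?_⟩
      have : (n - i) * j = (n - i) * q := by
        rw [hlin]; rw [hr0] at hdm; linarith
      exact mul_left_cancel₀ (by omega) this
    · rintro ⟨hr0, rfl⟩
      rw [hr0] at hdm
      linear_combination hdm
  have hstep : (fun (count j : Int) =>
        if n * (i + j) - i * j = k then count + pvCombination n i * pvCombination n j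
        else count)
      = (fun count j =>
        count + (if j = q ∧ r = 0 then pvCombination n i * pvCombination n j else 0)) := by
    funext count j
    by_cases h : n * (i + j) - i * j = k
    · rcases (hiff j).mp h with ⟨hr0, hjq⟩
      rw [if_pos h, if_pos (⟨hjq, hr0⟩ : j = q ∧ r = 0)]
    · have hnot : ¬ (j = q ∧ r = 0) := fun ⟨hjq, hr0⟩ => h ((hiff j).mpr ⟨hr0, hjq⟩)
      rw [if_neg h, if_neg hnot]
      simp
  rw [hstep, PySem.List.foldl_add]
  by_cases hr0 : r = 0
  · simp only [hr0, and_true]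
    rw [pv_sum_map_ite_eq _ (PySem.List.nodup_pyRange_one 0 n) q
          (fun j => pvCombination n i * pvCombination n j)]
    by_cases hmem : q ∈ PySem.List.pyRange 0 n 1
    · have hb := (PySem.List.mem_pyRange_one).mp hmem
      rw [if_pos hmem, if_pos (⟨trivial, hb.1, hb.2⟩ : True ∧ 0 ≤ q ∧ q < n)]
    · have hb : ¬ (0 ≤ q ∧ q < n) := fun h => hmem ((PySem.List.mem_pyRange_one).mpr h)
      have hnot2 : ¬ (True ∧ 0 ≤ q ∧ q < n) := fun h => hb h.2
      rw [if_neg hmem, if_neg hnot2]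
      simp
  · have : ((PySem.List.pyRange 0 n 1).map
        (fun j => if j = q ∧ r = 0 then pvCombination n i * pvCombination n j else 0)).sum = 0 := by
      have : ∀ j, (if j = q ∧ r = 0 then pvCombination n i * pvCombination n j else 0) = 0 := by
        intro j; simp [hr0]
      simp [this]
    rw [this]
    have : ¬ (r = 0 ∧ 0 ≤ q ∧ q < n) := fun h => hr0 h.1
    simp [this]

-- ===== VERDICT (by name: the statement is the Claim_ definition above) =====
theorem paintingPlan_spec : Claim_equal_paintingPlan := by
  intro n k _
  unfold Spec_paintingPlan paintingPlan paintingPlan_alt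
  by_cases hk : k = 0 ∨ k = n * n
  · simp [hk]
  · simp only [hk, if_false]
    apply PySem.List.foldl_congr_mem
    intro c i hi
    have hb := (PySem.List.mem_pyRange_one).mp hi
    exact pv_inner_eq n k i c hb.1 hb.2
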